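-- pv_equiv track=rewrite | github.com/ampiiere/comp4321-prjt | mysite/searchengine/scripts/tools/porter.py | count_m
-- ===== SOURCE A (Python) =====
-- def count_m(word):
--     vowel = 'aeiou'
--     structure = []
--     # [C](VC)m[V]
--     for c in word:
--         if c in vowel:
--             if (len(structure) == 0) or (structure[-1] == "c"):
--                 structure.append("v")
--             # if last is also a vowel, skip char
--         else: # not in vowel
--             if (len(structure) == 0) or (structure[-1] == "v"):
--                 structure.append("c")
--             # if last is also a c, skip char
--
--
--     if len(structure) % 2 == 0: # if even
--         m = len(structure)//2 - 1
--     else: # if odd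
--         m = len(structure)//2
--
--     return (structure, m)
-- ===== SOURCE B (Python) =====
-- def count_m(word):
--     # Reconstruct the structure arithmetically: count class transitions, then
--     # tile the alternating pattern from the first class; no run collapse.
--     if not word:
--         return ([], -1)
--     vow = [c in 'aeiou' for c in word]
--     L = 1 + sum(a != b for a, b in zip(vow, vow[1:]))
--     first = 'v' if vow[0] else 'c'
--     other = 'c' if vow[0] else 'v'
--     structure = [first, other] * (L // 2) + [first] * (L % 2)
--     return (structure, (L - 1) // 2)
-- ===== Notes on version B (the rewrite author's own statement) =====
-- stated objective: alternative
-- what changed: Instead of scanning and collapsing runs into an accumulator, B counts the adjacent class transitions arithmetically and reconstructs the structure list by tiling the alternating pattern [first,other] from its computed length, with m as the closed form (L-1)//2.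
import Mathlib
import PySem

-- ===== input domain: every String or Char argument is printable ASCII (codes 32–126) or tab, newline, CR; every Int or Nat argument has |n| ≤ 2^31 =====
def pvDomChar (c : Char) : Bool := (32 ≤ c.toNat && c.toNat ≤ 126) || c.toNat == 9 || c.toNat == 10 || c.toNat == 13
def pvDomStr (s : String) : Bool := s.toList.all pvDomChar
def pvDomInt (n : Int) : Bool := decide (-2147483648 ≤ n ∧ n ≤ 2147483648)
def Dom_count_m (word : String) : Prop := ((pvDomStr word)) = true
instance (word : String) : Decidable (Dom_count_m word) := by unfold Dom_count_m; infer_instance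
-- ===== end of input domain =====

-- B rebuilds the structure arithmetically (transition count + alternating tiling) instead of A's run-collapsing accumulator; same return value for every word.

-- ===== PORT A =====
-- one loop step of A: append "v"/"c" depending on the last element of structure
def count_m_step (st : List String) (c : Char) : List String :=
  if "aeiou".toList.contains c then
    (if st.length = 0 ∨ PySem.List.pyGet? st (-1) = some "c" then st ++ ["v"] else st)
  else
    (if st.length = 0 ∨ PySem.List.pyGet? st (-1) = some "v" then st ++ ["c"] else st)

def count_m (word : String) : List String × Int :=
  let st := word.toList.foldl count_m_step []
  let m : Int :=
    if (st.length : Int) % 2 = 0 then (st.length : Int) / 2 - 1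
    else (st.length : Int) / 2
  (st, m)

-- ===== PORT B =====
def count_m_alt (word : String) : List String × Int :=
  match word.toList with
  | [] => ([], -1)                                           -- if not word
  | c :: cs =>
      let vow := (c :: cs).map (fun ch => "aeiou".toList.contains ch)   -- [c in 'aeiou' for c in word]
      let L : Nat := 1 + (vow.zip vow.tail).countP (fun p => !(p.1 == p.2))  -- 1 + sum(a != b for a,b in zip(vow, vow[1:]))
      let first := if "aeiou".toList.contains c then "v" else "c"
      let other := if "aeiou".toList.contains c then "c" else "v"
      let st := (List.replicate (L / 2) [first, other]).flatten ++ List.replicate (L % 2) first  -- [first,other]*(L//2)+[first]*(L%2)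
      (st, PySem.Int.floordiv ((L : Int) - 1) 2)

-- ===== PRECONDITION & SPEC =====
def Spec_count_m (word : String) (out : List String × Int) : Prop := out = count_m_alt word
instance (word : String) (out : List String × Int) : Decidable (Spec_count_m word out) := by unfold Spec_count_m; infer_instance

-- ===== CLAIM (what is proved, stated in full; the proofs are below) =====
def Claim_equal_count_m : Prop := ∀ (word : String), Dom_count_m word → Spec_count_m word (count_m word)

-- ===== LEMMAS AND PROOFS =====

-- proof-side helpers: class of a Bool, number of adjacent transitions, alternating list
def pvCls (b : Bool) : String := if b then "v" else "c"

def pvChanges : List Bool → Nat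
  | [] => 0
  | [_] => 0
  | x :: y :: r => (if x = y then 0 else 1) + pvChanges (y :: r)

def pvAlt : Bool → Nat → List String
  | _, 0 => []
  | x, n + 1 => pvCls x :: pvAlt (!x) n

lemma pvAlt_one_add (x : Bool) (n : Nat) : pvAlt x (1 + n) = pvCls x :: pvAlt (!x) n := by
  rw [Nat.add_comm]; rfl

-- A's fold, once the accumulator ends in class x, appends the alternating tail
lemma count_m_fold_eq (cs : List Char) : ∀ (pre : List String) (x : Bool),
    List.foldl count_m_step (pre ++ [pvCls x]) cs
      = pre ++ pvAlt x (1 + pvChanges (x :: cs.map (fun ch => "aeiou".toList.contains ch))) := by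
  induction cs with
  | nil => intro pre x; cases x <;> simp [pvChanges, pvAlt]
  | cons c cs ih =>
    intro pre x
    by_cases hv : "aeiou".toList.contains c = true
    · cases x
      · have h1 : count_m_step (pre ++ [pvCls false]) c = (pre ++ [pvCls false]) ++ [pvCls true] := by
          unfold count_m_step pvCls
          rw [if_pos hv]
          simp [PySem.List.pyGet?_neg_one_append_singleton]
        simp only [List.foldl_cons, h1, List.map_cons, hv]
        rw [ih (pre ++ [pvCls false]) true]
        simp [pvChanges, pvAlt_one_add, pvCls]
      · have h1 : count_m_step (pre ++ [pvCls true]) c = pre ++ [pvCls true] := by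
          unfold count_m_step pvCls
          rw [if_pos hv]
          simp [PySem.List.pyGet?_neg_one_append_singleton]
        simp only [List.foldl_cons, h1, List.map_cons, hv]
        rw [ih pre true]
        simp [pvChanges]
    · cases x
      · have h1 : count_m_step (pre ++ [pvCls false]) c = pre ++ [pvCls false] := by
          unfold count_m_step pvCls
          rw [if_neg hv]
          simp [PySem.List.pyGet?_neg_one_append_singleton]
        simp only [List.foldl_cons, h1, List.map_cons, hv]
        rw [ih pre false]
        simp [pvChanges]
      · have h1 : count_m_step (pre ++ [pvCls true]) c = (pre ++ [pvCls true]) ++ [pvCls false] := by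
          unfold count_m_step pvCls
          rw [if_neg hv]
          simp [PySem.List.pyGet?_neg_one_append_singleton]
        simp only [List.foldl_cons, h1, List.map_cons, hv]
        rw [ih (pre ++ [pvCls true]) false]
        simp [pvChanges, pvAlt_one_add, pvCls]

-- A's whole structure, for a nonempty word, is the alternating list
lemma count_m_structure_eq (c : Char) (cs : List Char) :
    List.foldl count_m_step [] (c :: cs)
      = pvAlt ("aeiou".toList.contains c)
          (1 + pvChanges ((c :: cs).map (fun ch => "aeiou".toList.contains ch))) := by
  by_cases hv : "aeiou".toList.contains c = true
  · have h1 : count_m_step [] c = [] ++ [pvCls true] := by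
      unfold count_m_step pvCls
      rw [if_pos hv]
      simp [PySem.List.pyGet?]
    simp only [List.foldl_cons, h1, List.map_cons, hv]
    exact count_m_fold_eq cs [] true
  · have hv' : "aeiou".toList.contains c = false := eq_false_of_ne_true hv
    have h1 : count_m_step [] c = [] ++ [pvCls false] := by
      unfold count_m_step pvCls
      rw [if_neg hv]
      simp [PySem.List.pyGet?]
    simp only [List.foldl_cons, h1, List.map_cons, hv']
    exact count_m_fold_eq cs [] false

-- B's zip-count equals the transition count
lemma count_m_zip_changes : ∀ (bs : List Bool) (x : Bool),
    ((x :: bs).zip bs).countP (fun p => !(p.1 == p.2)) = pvChanges (x :: bs) := by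
  intro bs
  induction bs with
  | nil => intro x; simp [pvChanges]
  | cons y r ih =>
    intro x
    simp only [List.zip_cons_cons, List.countP_cons]
    rw [ih y]
    by_cases h : x = y <;> simp [pvChanges, h] <;> omega

-- B's tiling equals the alternating list
lemma count_m_tile_eq : ∀ (n : Nat) (x : Bool),
    (List.replicate (n / 2) [pvCls x, pvCls (!x)]).flatten
        ++ List.replicate (n % 2) (pvCls x) = pvAlt x n := by
  intro n
  induction n using Nat.strong_induction_on with
  | _ n ih =>
    match n with
    | 0 => intro x; simp [pvAlt]
    | 1 => intro x; simp [pvAlt]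
    | (m + 2) =>
      intro x
      have h2 : (m + 2) / 2 = m / 2 + 1 := by omega
      have h3 : (m + 2) % 2 = m % 2 := by omega
      rw [h2, h3, List.replicate_succ, List.flatten_cons]
      have := ih m (by omega) x
      simp only [pvAlt, Bool.not_not]
      simpa [List.append_assoc] using congrArg (fun l => pvCls x :: pvCls (!x) :: l) this

lemma pvAlt_length (n : Nat) : ∀ x, (pvAlt x n).length = n := by
  induction n with
  | zero => intro x; simp [pvAlt]
  | succ m ih => intro x; simp [pvAlt, ih]

-- the parity case split on m equals the closed form (L-1)//2
lemma count_m_m_eq (n : Nat) :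
    (if (n : Int) % 2 = 0 then (n : Int) / 2 - 1 else (n : Int) / 2)
      = PySem.Int.floordiv ((n : Int) - 1) 2 := by
  rw [PySem.Int.floordiv_eq_ediv_of_pos (by omega)]
  split_ifs with h <;> omega

-- ===== VERDICT (by name: the statement is the Claim_ definition above) =====
theorem count_m_spec : Claim_equal_count_m := by
  intro word _
  unfold Spec_count_m count_m count_m_alt
  cases h : word.toList with
  | nil => simp
  | cons c cs =>
    dsimp only
    rw [count_m_structure_eq c cs]
    simp only [List.map_cons, List.tail_cons, count_m_zip_changes]
    cases hcv : "aeiou".toList.contains c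
    · simp only [Bool.false_eq_true, if_false]
      refine Prod.ext ?_ ?_
      · have ht := count_m_tile_eq
          (1 + pvChanges (false :: cs.map (fun ch => "aeiou".toList.contains ch))) false
        simp only [pvCls, Bool.not_false, if_pos, Bool.false_eq_true, if_false] at ht
        exact ht.symm
      · rw [pvAlt_length]
        exact count_m_m_eq _
    · simp only [if_pos]
      refine Prod.ext ?_ ?_
      · have ht := count_m_tile_eq
          (1 + pvChanges (true :: cs.map (fun ch => "aeiou".toList.contains ch))) true
        simp only [pvCls, Bool.not_true, if_pos, Bool.false_eq_true, if_false] at ht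
        exact ht.symm
      · rw [pvAlt_length]
        exact count_m_m_eq _
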